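-- pv_equiv track=rewrite | github.com/waqasbukhari/Data-Structures-and-algorithms-in-Python | Chapter#04/ex_18.py | more_vowels_than_consonants
-- ===== SOURCE A (Python) =====
-- VOWELS = set(list('aeiou'))
--
-- def more_vowels_than_consonants(string):
--     if len(string) == 0:
--         return 0
--
--     if len(string) ==1:
--         return 1 if string in VOWELS else -1
--
--     mid_pt = len(string) // 2
--
--     more_vowels_1 = more_vowels_than_consonants(string[:mid_pt])
--     more_vowels_2 = more_vowels_than_consonants(string[mid_pt:])
--
--     return more_vowels_1 + more_vowels_2
-- ===== SOURCE B (Python) =====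
-- def more_vowels_than_consonants(string):
--     total = 0
--     for c in string:
--         total += 1 if c in 'aeiou' else -1
--     return total
-- ===== Notes on version B (the rewrite author's own statement) =====
-- stated objective: faster
-- what changed: Replaced the divide-and-conquer recursion with string slicing at each level by a single linear pass summing +1 per vowel and -1 per other character.
import Mathlib
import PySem

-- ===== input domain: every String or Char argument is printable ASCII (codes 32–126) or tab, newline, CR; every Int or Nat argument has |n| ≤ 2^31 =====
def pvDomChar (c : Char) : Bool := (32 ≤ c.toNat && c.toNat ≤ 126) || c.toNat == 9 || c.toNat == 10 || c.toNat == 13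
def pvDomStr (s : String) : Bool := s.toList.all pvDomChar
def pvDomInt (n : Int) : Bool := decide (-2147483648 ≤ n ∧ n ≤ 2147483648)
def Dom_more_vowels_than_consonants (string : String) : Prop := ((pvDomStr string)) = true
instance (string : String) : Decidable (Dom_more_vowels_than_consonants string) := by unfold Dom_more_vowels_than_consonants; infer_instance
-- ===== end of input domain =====

-- B replaces A's divide-and-conquer recursion by a single linear pass (+1 vowel / -1 other).

-- ===== PORT A =====
def pvVowels : List Char := ['a', 'e', 'i', 'o', 'u']

-- A's recursion, over the character list; slices string[:mid] / string[mid:] with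
-- mid = len // 2 ≥ 0 are exactly List.take / List.drop.
def mvcRecA (l : List Char) : Int :=
  if l.length = 0 then 0
  else if h1 : l.length = 1 then
    (if l.head? = some 'a' ∨ l.head? = some 'e' ∨ l.head? = some 'i' ∨
        l.head? = some 'o' ∨ l.head? = some 'u' then 1 else -1)
  else
    mvcRecA (l.take (l.length / 2)) + mvcRecA (l.drop (l.length / 2))
termination_by l.length
decreasing_by
  · simp only [List.length_take]
    omega
  · simp only [List.length_drop]
    omega

def more_vowels_than_consonants (string : String) : Int := mvcRecA string.toList

-- ===== PORT B =====
def more_vowels_than_consonants_alt (string : String) : Int :=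
  string.toList.foldl (fun total c => total + (if c ∈ pvVowels then 1 else -1)) 0

-- ===== PRECONDITION & SPEC =====
def Spec_more_vowels_than_consonants (string : String) (out : Int) : Prop := out = more_vowels_than_consonants_alt string
instance (string : String) (out : Int) : Decidable (Spec_more_vowels_than_consonants string out) := by unfold Spec_more_vowels_than_consonants; infer_instance

-- ===== CLAIM (what is proved, stated in full; the proofs are below) =====
def Claim_equal_more_vowels_than_consonants : Prop := ∀ (string : String), Dom_more_vowels_than_consonants string → Spec_more_vowels_than_consonants string (more_vowels_than_consonants string)

-- ===== LEMMAS AND PROOFS =====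

def mvcScore (c : Char) : Int := if c ∈ pvVowels then 1 else -1

theorem mvcFoldl_eq (l : List Char) (a : Int) :
    l.foldl (fun total c => total + (if c ∈ pvVowels then 1 else -1)) a
      = a + (l.map mvcScore).sum := by
  induction l generalizing a with
  | nil => simp
  | cons c t ih => simp [List.foldl, ih, mvcScore]; ring

theorem mvcRecA_eq_sum (l : List Char) : mvcRecA l = (l.map mvcScore).sum := by
  induction hn : l.length using Nat.strong_induction_on generalizing l with
  | _ n ih =>
    match l, hn with
    | [], _ => simp [mvcRecA]
    | [c], _ =>
      by_cases h : c = 'a' ∨ c = 'e' ∨ c = 'i' ∨ c = 'o' ∨ c = 'u' <;>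
        simp [mvcRecA, mvcScore, pvVowels, h]
    | c₁ :: c₂ :: t, hn =>
      rw [mvcRecA]
      have hlen : (c₁ :: c₂ :: t).length ≠ 0 ∧ (c₁ :: c₂ :: t).length ≠ 1 := by
        simp
      rw [if_neg hlen.1, dif_neg hlen.2]
      set l' : List Char := c₁ :: c₂ :: t with hl'
      have hmidlt : l'.length / 2 < l'.length := by
        simp [hl']; omega
      have h1 : (l'.take (l'.length / 2)).length < n := by
        simp only [List.length_take]; omega
      have h2 : (l'.drop (l'.length / 2)).length < n := by
        simp only [List.length_drop]; omega
      rw [ih _ h1 _ rfl, ih _ h2 _ rfl]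
      rw [← List.sum_append, ← List.map_append, List.take_append_drop]

-- ===== VERDICT (by name: the statement is the Claim_ definition above) =====
theorem more_vowels_than_consonants_spec : Claim_equal_more_vowels_than_consonants := by
  intro s _
  unfold Spec_more_vowels_than_consonants more_vowels_than_consonants more_vowels_than_consonants_alt
  rw [mvcFoldl_eq, mvcRecA_eq_sum]
  simp
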